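-- pv_equiv track=rewrite | github.com/ar-a06/factryl | app/scraper/news/google_news.py | _expand_title_intelligently
-- ===== SOURCE A (Python) =====
-- def _expand_title_intelligently(title: str) -> str:
--     """Expand a title into more narrative content based on context clues."""
--
--     # Extract key information from the title
--     words = title.lower()
--
--     # Technology-related expansions
--     if any(tech_term in words for tech_term in ['ai', 'artificial intelligence', 'technology', 'tech', 'startup', 'app']):
--         return f"{title}. This development represents continued innovation in the technology sector, reflecting ongoing advancement and industry evolution. The announcement indicates significant progress in technological capabilities and market dynamics."
--
--     # Business/Economic expansions
--     elif any(biz_term in words for biz_term in ['company', 'business', 'market', 'stock', 'economy', 'financial']):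
--         return f"{title}. This business development highlights current market dynamics and economic activity. The announcement reflects ongoing commercial operations and financial sector movements that continue to shape industry landscapes."
--
--     # Political/Government expansions
--     elif any(pol_term in words for pol_term in ['government', 'policy', 'election', 'president', 'minister', 'congress']):
--         return f"{title}. This political development affects governance and policy implementation. The announcement demonstrates ongoing governmental activities and policy decisions that impact public administration and civic affairs."
--
--     # Health/Medical expansions
--     elif any(health_term in words for health_term in ['health', 'medical', 'hospital', 'vaccine', 'treatment', 'study']):
--         return f"{title}. This health-related development contributes to medical understanding and healthcare advancement. The research represents ongoing efforts to improve public health outcomes and medical knowledge."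
--
--     # Sports expansions
--     elif any(sport_term in words for sport_term in ['sports', 'game', 'match', 'team', 'player', 'tournament']):
--         return f"{title}. This sports development reflects competitive dynamics and athletic performance. The event demonstrates ongoing sporting activities and achievements that engage fans and participants in athletic competitions."
--
--     # Default expansion
--     else:
--         return f"{title}. This development represents a significant occurrence in its respective field, indicating ongoing activities and changes that continue to shape current events and public discourse."
-- ===== SOURCE B (Python) =====
-- # B: one flat keyword->category map scanned in a single pass keeping the minimum
-- # category index seen; category priority is encoded numerically instead of by an
-- # if/elif chain (min index == highest-priority matching category).
--
-- _KEYWORD_CATEGORY = {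
--     'ai': 0, 'artificial intelligence': 0, 'technology': 0, 'tech': 0, 'startup': 0, 'app': 0,
--     'company': 1, 'business': 1, 'market': 1, 'stock': 1, 'economy': 1, 'financial': 1,
--     'government': 2, 'policy': 2, 'election': 2, 'president': 2, 'minister': 2, 'congress': 2,
--     'health': 3, 'medical': 3, 'hospital': 3, 'vaccine': 3, 'treatment': 3, 'study': 3,
--     'sports': 4, 'game': 4, 'match': 4, 'team': 4, 'player': 4, 'tournament': 4,
-- }
--
-- _TAILS = [
--     "This development represents continued innovation in the technology sector, reflecting ongoing advancement and industry evolution. The announcement indicates significant progress in technological capabilities and market dynamics.",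
--     "This business development highlights current market dynamics and economic activity. The announcement reflects ongoing commercial operations and financial sector movements that continue to shape industry landscapes.",
--     "This political development affects governance and policy implementation. The announcement demonstrates ongoing governmental activities and policy decisions that impact public administration and civic affairs.",
--     "This health-related development contributes to medical understanding and healthcare advancement. The research represents ongoing efforts to improve public health outcomes and medical knowledge.",
--     "This sports development reflects competitive dynamics and athletic performance. The event demonstrates ongoing sporting activities and achievements that engage fans and participants in athletic competitions.",
--     "This development represents a significant occurrence in its respective field, indicating ongoing activities and changes that continue to shape current events and public discourse.",
-- ]
--
--
-- def _expand_title_intelligently(title: str) -> str: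
--     """Expand a title into more narrative content based on context clues."""
--     words = title.lower()
--     cat = 5  # default category
--     for kw, idx in _KEYWORD_CATEGORY.items():
--         if kw in words:
--             cat = min(cat, idx)
--     return f"{title}. {_TAILS[cat]}"
-- ===== Notes on version B (the rewrite author's own statement) =====
-- stated objective: alternative
-- what changed: Replaced the five if/elif branches (each with its own any() scan and full return string) by one flat keyword-to-category-index map scanned in a single pass that keeps the minimum matching category index, which then selects the tail from an indexed list; priority becomes numeric min instead of branch order.
import Mathlib
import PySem

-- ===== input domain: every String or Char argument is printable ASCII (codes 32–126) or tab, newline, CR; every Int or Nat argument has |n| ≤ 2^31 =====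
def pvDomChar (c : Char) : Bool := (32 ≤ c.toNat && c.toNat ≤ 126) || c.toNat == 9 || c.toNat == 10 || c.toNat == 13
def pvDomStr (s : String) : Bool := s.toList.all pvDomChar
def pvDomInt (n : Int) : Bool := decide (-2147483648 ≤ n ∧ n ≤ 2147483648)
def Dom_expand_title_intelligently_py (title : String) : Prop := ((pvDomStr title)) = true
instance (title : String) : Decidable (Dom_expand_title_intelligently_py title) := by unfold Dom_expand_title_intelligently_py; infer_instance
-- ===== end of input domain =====

-- One honest line: B replaces A's five if/elif branches by a single flat keyword->category-index
-- map scanned once keeping the minimum matching index; objective: alternative (no speed claim).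

-- ===== PORT A =====
def expand_title_intelligently_py (title : String) : String :=
  let words := PySem.Str.lower title
  if ["ai", "artificial intelligence", "technology", "tech", "startup", "app"].any (fun t => PySem.Str.isIn t words) then
    title ++ ". This development represents continued innovation in the technology sector, reflecting ongoing advancement and industry evolution. The announcement indicates significant progress in technological capabilities and market dynamics."
  else if ["company", "business", "market", "stock", "economy", "financial"].any (fun t => PySem.Str.isIn t words) then
    title ++ ". This business development highlights current market dynamics and economic activity. The announcement reflects ongoing commercial operations and financial sector movements that continue to shape industry landscapes."
  else if ["government", "policy", "election", "president", "minister", "congress"].any (fun t => PySem.Str.isIn t words) then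
    title ++ ". This political development affects governance and policy implementation. The announcement demonstrates ongoing governmental activities and policy decisions that impact public administration and civic affairs."
  else if ["health", "medical", "hospital", "vaccine", "treatment", "study"].any (fun t => PySem.Str.isIn t words) then
    title ++ ". This health-related development contributes to medical understanding and healthcare advancement. The research represents ongoing efforts to improve public health outcomes and medical knowledge."
  else if ["sports", "game", "match", "team", "player", "tournament"].any (fun t => PySem.Str.isIn t words) then
    title ++ ". This sports development reflects competitive dynamics and athletic performance. The event demonstrates ongoing sporting activities and achievements that engage fans and participants in athletic competitions."
  else
    title ++ ". This development represents a significant occurrence in its respective field, indicating ongoing activities and changes that continue to shape current events and public discourse."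

-- ===== PORT B =====
def pvGrp0 : List (String × Nat) := [("ai", 0), ("artificial intelligence", 0), ("technology", 0), ("tech", 0), ("startup", 0), ("app", 0)]
def pvGrp1 : List (String × Nat) := [("company", 1), ("business", 1), ("market", 1), ("stock", 1), ("economy", 1), ("financial", 1)]
def pvGrp2 : List (String × Nat) := [("government", 2), ("policy", 2), ("election", 2), ("president", 2), ("minister", 2), ("congress", 2)]
def pvGrp3 : List (String × Nat) := [("health", 3), ("medical", 3), ("hospital", 3), ("vaccine", 3), ("treatment", 3), ("study", 3)]
def pvGrp4 : List (String × Nat) := [("sports", 4), ("game", 4), ("match", 4), ("team", 4), ("player", 4), ("tournament", 4)]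

-- flat keyword -> category-index map (Source B's _KEYWORD_CATEGORY, insertion order)
def pvPairs : List (String × Nat) := pvGrp0 ++ pvGrp1 ++ pvGrp2 ++ pvGrp3 ++ pvGrp4

def pvTails : List String :=
  [ "This development represents continued innovation in the technology sector, reflecting ongoing advancement and industry evolution. The announcement indicates significant progress in technological capabilities and market dynamics.",
    "This business development highlights current market dynamics and economic activity. The announcement reflects ongoing commercial operations and financial sector movements that continue to shape industry landscapes.",
    "This political development affects governance and policy implementation. The announcement demonstrates ongoing governmental activities and policy decisions that impact public administration and civic affairs.",
    "This health-related development contributes to medical understanding and healthcare advancement. The research represents ongoing efforts to improve public health outcomes and medical knowledge.",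
    "This sports development reflects competitive dynamics and athletic performance. The event demonstrates ongoing sporting activities and achievements that engage fans and participants in athletic competitions.",
    "This development represents a significant occurrence in its respective field, indicating ongoing activities and changes that continue to shape current events and public discourse." ]

def expand_title_intelligently_py_alt (title : String) : String :=
  let words := PySem.Str.lower title
  let cat := pvPairs.foldl (fun a p => if PySem.Str.isIn p.1 words then min a p.2 else a) 5
  title ++ ". " ++ pvTails.getD cat ""   -- _TAILS[cat]; cat ≤ 5 always, so getD is exact

-- ===== PRECONDITION & SPEC =====
def Spec_expand_title_intelligently_py (title : String) (out : String) : Prop := out = expand_title_intelligently_py_alt title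
instance (title : String) (out : String) : Decidable (Spec_expand_title_intelligently_py title out) := by unfold Spec_expand_title_intelligently_py; infer_instance

-- ===== CLAIM =====
def Claim_equal_expand_title_intelligently_py : Prop := ∀ (title : String), Dom_expand_title_intelligently_py title → Spec_expand_title_intelligently_py title (expand_title_intelligently_py title)

-- ===== LEMMAS AND PROOFS =====
-- folding the min-accumulator over one six-keyword group with a common index i
theorem pv_fold6 (words : String) (k1 k2 k3 k4 k5 k6 : String) (i a : Nat) :
    List.foldl (fun a (p : String × Nat) => if PySem.Str.isIn p.1 words then min a p.2 else a) a
      [(k1, i), (k2, i), (k3, i), (k4, i), (k5, i), (k6, i)]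
    = if [k1, k2, k3, k4, k5, k6].any (fun t => PySem.Str.isIn t words) then min a i else a := by
  simp only [List.foldl_cons, List.foldl_nil, List.any_cons, List.any_nil, Bool.or_false]
  cases PySem.Str.isIn k1 words <;> cases PySem.Str.isIn k2 words <;>
    cases PySem.Str.isIn k3 words <;> cases PySem.Str.isIn k4 words <;>
    cases PySem.Str.isIn k5 words <;> cases PySem.Str.isIn k6 words <;>
    simp

-- ===== VERDICT =====
set_option maxRecDepth 100000 in
set_option maxHeartbeats 2000000 in
theorem expand_title_intelligently_py_spec : Claim_equal_expand_title_intelligently_py := by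
  intro title _
  unfold Spec_expand_title_intelligently_py expand_title_intelligently_py
    expand_title_intelligently_py_alt pvPairs pvGrp0 pvGrp1 pvGrp2 pvGrp3 pvGrp4
  simp only [List.foldl_append, pv_fold6]
  by_cases h0 : ["ai", "artificial intelligence", "technology", "tech", "startup", "app"].any (fun t => PySem.Str.isIn t (PySem.Str.lower title)) <;>
  by_cases h1 : ["company", "business", "market", "stock", "economy", "financial"].any (fun t => PySem.Str.isIn t (PySem.Str.lower title)) <;>
  by_cases h2 : ["government", "policy", "election", "president", "minister", "congress"].any (fun t => PySem.Str.isIn t (PySem.Str.lower title)) <;>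
  by_cases h3 : ["health", "medical", "hospital", "vaccine", "treatment", "study"].any (fun t => PySem.Str.isIn t (PySem.Str.lower title)) <;>
  by_cases h4 : ["sports", "game", "match", "team", "player", "tournament"].any (fun t => PySem.Str.isIn t (PySem.Str.lower title)) <;>
    simp only [h0, h1, h2, h3, h4, if_true, pvTails] <;>
    norm_num <;> (rw [String.append_assoc]; rfl)
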